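-- pv_equiv track=rewrite | github.com/orglassman/SSJPLI | relation.py | compare_domains
-- ===== SOURCE A (Python) =====
-- def compare_domains(original, sampled):
--     shared = sorted(list(set(original).intersection(set(sampled))))
--     not_shared = []
--     for x in original:
--         if x in shared:
--             continue
--         not_shared.append(x)
--
--     return shared, not_shared
-- ===== SOURCE B (Python) =====
-- def _merge_common(a, b):
--     # a, b strictly increasing; their common elements, in order (sorted merge)
--     out = []
--     i = j = 0
--     while i < len(a) and j < len(b):
--         if a[i] < b[j]:
--             i += 1
--         elif b[j] < a[i]:
--             j += 1
--         else:
--             out.append(a[i])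
--             i += 1
--             j += 1
--     return out
--
--
-- def _bisect_left(a, x, lo, hi):
--     if lo >= hi:
--         return lo
--     mid = (lo + hi) // 2
--     if a[mid] < x:
--         return _bisect_left(a, x, mid + 1, hi)
--     return _bisect_left(a, x, lo, mid)
--
--
-- def compare_domains(original, sampled):
--     # shared domain by merging the two sorted deduplicated lists
--     shared = _merge_common(sorted(set(original)), sorted(set(sampled)))
--     # non-shared originals by binary search in the sorted shared list
--     not_shared = []
--     for x in original:
--         k = _bisect_left(shared, x, 0, len(shared))
--         if k == len(shared) or shared[k] != x:
--             not_shared.append(x)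
--     return shared, not_shared
-- ===== Notes on version B (the rewrite author's own statement) =====
-- stated objective: faster
-- what changed: Computes the shared domain by a two-pointer merge of the two sorted deduplicated lists instead of hash-set intersection, and filters not_shared by binary search in the sorted shared list instead of A's linear membership scan over it.
import Mathlib
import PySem

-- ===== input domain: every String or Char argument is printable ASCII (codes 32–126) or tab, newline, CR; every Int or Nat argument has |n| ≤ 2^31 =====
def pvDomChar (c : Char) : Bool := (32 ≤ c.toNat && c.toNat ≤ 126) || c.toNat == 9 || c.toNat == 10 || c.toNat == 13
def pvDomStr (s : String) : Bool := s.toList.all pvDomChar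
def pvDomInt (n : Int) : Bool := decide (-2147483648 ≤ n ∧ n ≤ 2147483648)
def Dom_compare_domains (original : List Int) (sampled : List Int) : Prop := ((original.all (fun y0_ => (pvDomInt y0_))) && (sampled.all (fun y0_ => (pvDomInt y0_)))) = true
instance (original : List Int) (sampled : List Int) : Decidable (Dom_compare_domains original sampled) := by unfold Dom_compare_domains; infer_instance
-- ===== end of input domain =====

-- B replaces A's hash-set intersection (plus a linear membership scan over the shared list)
-- by a two-pointer merge of the two sorted deduplicated lists and a binary-search filter.

-- ===== PORT A =====
def compare_domains (original : List Int) (sampled : List Int) : List Int × List Int :=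
  -- shared = sorted(list(set(original).intersection(set(sampled))))
  let shared : List Int :=
    PySem.List.sorted (PySem.Set.inter (PySem.Set.ofList original) (PySem.Set.ofList sampled))
      (fun x => x) false
  -- for x in original: if x in shared: continue; not_shared.append(x)
  let not_shared : List Int :=
    original.foldl (fun acc x => if PySem.Set.contains shared x then acc else acc ++ [x]) []
  (shared, not_shared)

-- ===== PORT B =====
-- while i < len(a) and j < len(b): advance the pointer at the smaller head
-- (index i advancing over a ≙ taking a's tail; same comparisons, same appends)
def mergeCommon : List Int → List Int → List Int
  | [], _ => []
  | _ :: _, [] => []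
  | x :: a, y :: b =>
    if x < y then mergeCommon a (y :: b)
    else if y < x then mergeCommon (x :: a) b
    else x :: mergeCommon a b
termination_by a b => a.length + b.length

-- def _bisect_left(a, x, lo, hi): recursive halving; a[mid] is read with getD (mid is always in range)
def bisectLeftRec (a : List Int) (x : Int) (lo hi : Nat) : Nat :=
  if lo ≥ hi then lo
  else
    let mid := (lo + hi) / 2
    if a.getD mid 0 < x then bisectLeftRec a x (mid + 1) hi
    else bisectLeftRec a x lo mid
termination_by hi - lo
decreasing_by all_goals simp at *; omega

def compare_domains_alt (original : List Int) (sampled : List Int) : List Int × List Int :=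
  let shared : List Int :=
    mergeCommon (PySem.List.sorted (PySem.Set.ofList original) (fun x => x) false)
                (PySem.List.sorted (PySem.Set.ofList sampled) (fun x => x) false)
  let not_shared : List Int :=
    original.foldl (fun acc x =>
      let k := bisectLeftRec shared x 0 shared.length
      if k = shared.length ∨ shared.getD k 0 ≠ x then acc ++ [x] else acc) []
  (shared, not_shared)

-- ===== PRECONDITION & SPEC =====
def Spec_compare_domains (original : List Int) (sampled : List Int) (out : List Int × List Int) : Prop := out = compare_domains_alt original sampled
instance (original : List Int) (sampled : List Int) (out : List Int × List Int) : Decidable (Spec_compare_domains original sampled out) := by unfold Spec_compare_domains; infer_instance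

-- ===== CLAIM (what is proved, stated in full; the proofs are below) =====
def Claim_equal_compare_domains : Prop := ∀ (original : List Int) (sampled : List Int), Dom_compare_domains original sampled → Spec_compare_domains original sampled (compare_domains original sampled)

-- ===== LEMMAS AND PROOFS =====

-- the merge result is a sublist of its left input
lemma mergeCommon_sublist_left (a b : List Int) : (mergeCommon a b).Sublist a := by
  fun_induction mergeCommon a b with
  | case1 => simp
  | case2 => simp
  | case3 x a y b h ih => exact (ih.trans (List.sublist_cons_self x a))
  | case4 x a y b h h2 ih => exact ih
  | case5 x a y b h h2 ih => exact ih.cons₂ x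

-- membership in the merge of two strictly increasing lists is membership in both
lemma mem_mergeCommon (a b : List Int) (ha : a.Pairwise (· < ·)) (hb : b.Pairwise (· < ·)) :
    ∀ (z : Int), z ∈ mergeCommon a b ↔ z ∈ a ∧ z ∈ b := by
  revert ha hb
  fun_induction mergeCommon a b with
  | case1 => simp
  | case2 => simp
  | case3 x a y b h ih =>
    intro ha hb z
    rw [ih (List.Pairwise.of_cons ha) hb]
    simp only [List.mem_cons]
    constructor
    · rintro ⟨h1, h2⟩; exact ⟨Or.inr h1, h2⟩
    · rintro ⟨h1 | h1, h2⟩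
      · exfalso
        rcases h2 with h2 | h2
        · omega
        · have := (List.pairwise_cons.mp hb).1 z h2; omega
      · exact ⟨h1, h2⟩
  | case4 x a y b h h2 ih =>
    intro ha hb z
    rw [ih ha (List.Pairwise.of_cons hb)]
    simp only [List.mem_cons]
    constructor
    · rintro ⟨h1, h3⟩; exact ⟨h1, Or.inr h3⟩
    · rintro ⟨h1, h3 | h3⟩
      · exfalso
        rcases h1 with h1 | h1
        · omega
        · have := (List.pairwise_cons.mp ha).1 z h1; omega
      · exact ⟨h1, h3⟩
  | case5 x a y b h h2 ih =>
    intro ha hb z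
    have hxy : x = y := le_antisymm (not_lt.mp h2) (not_lt.mp h)
    subst hxy
    simp only [List.mem_cons, ih (List.Pairwise.of_cons ha) (List.Pairwise.of_cons hb)]
    constructor
    · rintro (rfl | ⟨h1, h3⟩)
      · exact ⟨Or.inl rfl, Or.inl rfl⟩
      · exact ⟨Or.inr h1, Or.inr h3⟩
    · rintro ⟨h1 | h1, h3 | h3⟩
      · exact Or.inl h1
      · exact Or.inl h1
      · subst h3
        exact absurd ((List.pairwise_cons.mp ha).1 z h1) (lt_irrefl z)
      · exact Or.inr ⟨h1, h3⟩

-- invariant of the binary search: everything left of the result is < x, everything right is ≥ x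
lemma bisectLeftRec_inv (a : List Int) (x : Int)
    (hmono : ∀ i j, i ≤ j → j < a.length → a.getD i 0 ≤ a.getD j 0) :
    ∀ (lo hi : Nat), lo ≤ hi → hi ≤ a.length →
    (∀ i, i < lo → a.getD i 0 < x) →
    (∀ i, hi ≤ i → i < a.length → x ≤ a.getD i 0) →
    (∀ i, i < bisectLeftRec a x lo hi → a.getD i 0 < x) ∧
    (∀ i, bisectLeftRec a x lo hi ≤ i → i < a.length → x ≤ a.getD i 0) ∧
    bisectLeftRec a x lo hi ≤ a.length := by
  intro lo hi
  fun_induction bisectLeftRec a x lo hi with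
  | case1 lo hi hge =>
    intro hle hlen hlo hhi
    refine ⟨hlo, ?_, le_trans hle hlen⟩
    intro i hi1 hi2
    exact hhi i (le_trans (by omega) hi1) hi2
  | case2 lo hi hge mid hlt ih =>
    intro hle hlen hlo hhi
    have hmid : lo ≤ mid ∧ mid < hi := by simp only [mid]; omega
    refine ih (by omega) hlen ?_ hhi
    intro i hi1
    exact lt_of_le_of_lt (hmono i mid (by omega) (by omega)) hlt
  | case3 lo hi hge mid hnlt ih =>
    intro hle hlen hlo hhi
    have hmid : lo ≤ mid ∧ mid < hi := by simp only [mid]; omega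
    refine ih (by omega) (by omega) hlo ?_
    intro i hi1 hi2
    exact le_trans (not_lt.mp hnlt) (hmono mid i hi1 hi2)

-- a strictly increasing list is monotone at getD indices
lemma pairwise_lt_mono (a : List Int) (ha : a.Pairwise (· < ·)) :
    ∀ i j, i ≤ j → j < a.length → a.getD i 0 ≤ a.getD j 0 := by
  intro i j hij hj
  rcases eq_or_lt_of_le hij with rfl | hlt
  · exact le_refl _
  · rw [List.getD_eq_getElem a 0 (by omega), List.getD_eq_getElem a 0 hj]
    exact le_of_lt (List.pairwise_iff_getElem.mp ha i j (by omega) hj hlt)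

-- B's binary-search miss test decides non-membership in a strictly increasing list
lemma bisect_test (a : List Int) (ha : a.Pairwise (· < ·)) (x : Int) :
    (bisectLeftRec a x 0 a.length = a.length ∨
      a.getD (bisectLeftRec a x 0 a.length) 0 ≠ x) ↔ x ∉ a := by
  have hmono := pairwise_lt_mono a ha
  obtain ⟨h1, h2, h3⟩ := bisectLeftRec_inv a x hmono 0 a.length (Nat.zero_le _) (le_refl _)
    (by omega) (by intro i hi1 hi2; omega)
  set k := bisectLeftRec a x 0 a.length with hk
  constructor
  · rintro (hke | hne) hmem
    · obtain ⟨i, hi, hxi⟩ := List.mem_iff_getElem.mp hmem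
      have : a.getD i 0 = x := by rw [List.getD_eq_getElem a 0 hi]; exact hxi
      rcases lt_or_ge i k with hik | hik
      · have := h1 i hik; omega
      · omega
    · obtain ⟨i, hi, hxi⟩ := List.mem_iff_getElem.mp hmem
      have hgi : a.getD i 0 = x := by rw [List.getD_eq_getElem a 0 hi]; exact hxi
      have hik : k ≤ i := by
        by_contra hc
        have := h1 i (by omega); omega
      have hklen : k < a.length := by omega
      have hx1 : x ≤ a.getD k 0 := h2 k (le_refl _) hklen
      have hx2 : a.getD k 0 ≤ a.getD i 0 := hmono k i hik hi
      exact hne (by omega)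
  · intro hnm
    by_contra hc
    push Not at hc
    obtain ⟨hke, heq⟩ := hc
    have hklen : k < a.length := by omega
    exact hnm (heq ▸ (List.getD_eq_getElem a 0 hklen ▸ List.getElem_mem hklen))

-- ===== VERDICT (by name: the statement is the Claim_ definition above) =====
theorem compare_domains_spec : Claim_equal_compare_domains := by
  intro original sampled _
  show compare_domains original sampled = compare_domains_alt original sampled
  unfold compare_domains compare_domains_alt
  dsimp only
  set sO := PySem.List.sorted (PySem.Set.ofList original) (fun x => x) false with hsO
  set sS := PySem.List.sorted (PySem.Set.ofList sampled) (fun x => x) false with hsS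
  have hOlt : sO.Pairwise (· < ·) := PySem.List.sorted_ofList_pairwise_lt original
  have hSlt : sS.Pairwise (· < ·) := PySem.List.sorted_ofList_pairwise_lt sampled
  set S := mergeCommon sO sS with hS
  have hSpw : S.Pairwise (· < ·) := List.Pairwise.sublist (mergeCommon_sublist_left sO sS) hOlt
  have memS : ∀ z : Int, z ∈ S ↔ z ∈ original ∧ z ∈ sampled := by
    intro z
    rw [hS, mem_mergeCommon sO sS hOlt hSlt z, hsO, hsS,
        PySem.List.mem_sorted, PySem.List.mem_sorted,
        PySem.Set.mem_ofList, PySem.Set.mem_ofList]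
  have hsharedA : PySem.List.sorted
      (PySem.Set.inter (PySem.Set.ofList original) (PySem.Set.ofList sampled))
      (fun x => x) false = S := by
    apply PySem.List.sorted_eq_of_perm_of_pairwise_lt _ _ _ ?_ hSpw
    refine (List.perm_ext_iff_of_nodup hSpw.nodup
      (PySem.Set.nodup_inter _ _ (PySem.Set.nodup_ofList original))).mpr ?_
    intro z
    rw [memS, PySem.Set.mem_inter, PySem.Set.mem_ofList, PySem.Set.mem_ofList]
  rw [hsharedA]
  refine congrArg (Prod.mk S) ?_
  apply PySem.List.foldl_congr_mem
  intro acc x _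
  by_cases hx : x ∈ S
  · rw [if_pos ((PySem.Set.contains_iff S x).mpr hx),
        if_neg (by rw [bisect_test S hSpw x]; exact fun h => h hx)]
  · rw [if_neg (fun hc => hx ((PySem.Set.contains_iff S x).mp hc)),
        if_pos ((bisect_test S hSpw x).mpr hx)]
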